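-- pv_equiv track=rewrite | github.com/Ishpreet39/DSA-Coding-Challenges | reversing_equation.py | reverseEqn
-- ===== SOURCE A (Python) =====
-- def reverseEqn(s):
--     # code here
--     def split_equation(s):
--         equation = []
--         num = ""
--         for char in s:
--             if char.isdigit():
--                 num += char
--             else:
--                 if num:
--                     equation.append(num)
--                     num = ""
--                 equation.append(char)
--         if num:
--             equation.append(num)
--         return equation
--
--     # Reverse the numbers and join them with operators
--     equation_parts = split_equation(s)
--     reversed_equation = "".join(equation_parts[::-1])
--     return reversed_equation
-- ===== SOURCE B (Python) =====
-- def reverseEqn(s):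
--     # Token-at-a-time index scan: extract each maximal digit run (or single
--     # non-digit char) by index and prepend it to the output, so the result is
--     # built back-to-front with no token list and no per-char buffer.
--     out = ""
--     i, n = 0, len(s)
--     while i < n:
--         if s[i].isdigit():
--             j = i
--             while j < n and s[j].isdigit():
--                 j += 1
--             out = s[i:j] + out
--             i = j
--         else:
--             out = s[i] + out
--             i += 1
--     return out
-- ===== Notes on version B (the rewrite author's own statement) =====
-- stated objective: alternative
-- what changed: Instead of tokenizing the string into a list of number/operator tokens and joining the reversed token list, B scans by index one token at a time (extending each maximal digit run with an inner index loop) and prepends each token to the output, building the result back-to-front with no token list and no per-char buffer.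
import Mathlib
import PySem

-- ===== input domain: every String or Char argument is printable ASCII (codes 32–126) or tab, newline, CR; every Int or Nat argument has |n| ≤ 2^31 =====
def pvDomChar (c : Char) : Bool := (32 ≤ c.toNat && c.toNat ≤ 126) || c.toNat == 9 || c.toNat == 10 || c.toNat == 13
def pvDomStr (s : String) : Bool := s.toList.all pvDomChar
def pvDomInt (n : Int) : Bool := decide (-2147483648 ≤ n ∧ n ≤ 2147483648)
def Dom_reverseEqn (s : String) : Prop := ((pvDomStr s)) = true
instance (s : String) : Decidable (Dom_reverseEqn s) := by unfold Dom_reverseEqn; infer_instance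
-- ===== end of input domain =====

-- B scans by index one token at a time (maximal digit run or single char) and prepends each
-- token to the output, building the result back-to-front with no token list; alternative
-- decomposition of the same task (A tokenizes into a list and joins its reverse).


-- ===== PORT A =====
-- the for-loop of split_equation: state = (equation, num), strings as List Char
def reverseEqnStepA (st : List (List Char) × List Char) (c : Char) : List (List Char) × List Char :=
  if PySem.Chars.isdigit c then (st.1, st.2 ++ [c])
  else ((st.1 ++ (if st.2 ≠ [] then [st.2] else [])) ++ [[c]], [])

def reverseEqn (s : String) : String :=
  let st := s.toList.foldl reverseEqnStepA ([], [])
  let equation := st.1 ++ (if st.2 ≠ [] then [st.2] else [])   -- trailing "if num" flush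
  String.ofList (equation.reverse.flatten)                     -- "".join(equation_parts[::-1])

-- ===== PORT B =====
-- B's outer while loop: the suffix s[i:] is the remaining list; the inner digit-run scan
-- s[i:j] / advance to j is takeWhile/dropWhile on that suffix; 'out = tok + out' prepends.
def reverseEqnGoB (cs : List Char) (out : List Char) : List Char :=
  match cs with
  | [] => out
  | c :: rest =>
    if PySem.Chars.isdigit c then
      reverseEqnGoB ((c :: rest).dropWhile PySem.Chars.isdigit)
        ((c :: rest).takeWhile PySem.Chars.isdigit ++ out)
    else
      reverseEqnGoB rest (c :: out)
termination_by cs.length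
decreasing_by
  · simp only [List.dropWhile_cons_of_pos ‹_›]
    exact Nat.lt_succ_of_le (List.length_dropWhile_le _ _)
  · simp

def reverseEqn_alt (s : String) : String :=
  String.ofList (reverseEqnGoB s.toList [])

-- ===== PRECONDITION & SPEC =====
def Spec_reverseEqn (s : String) (out : String) : Prop := out = reverseEqn_alt s
instance (s : String) (out : String) : Decidable (Spec_reverseEqn s out) := by unfold Spec_reverseEqn; infer_instance

-- ===== CLAIM (what is proved, stated in full; the proofs are below) =====
def Claim_equal_reverseEqn : Prop := ∀ (s : String), Dom_reverseEqn s → Spec_reverseEqn s (reverseEqn s)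

-- ===== LEMMAS AND PROOFS =====

-- proof-side recursive form of A's tokenizer: tokens of cs given pending digit buffer num
def splitA (cs : List Char) (num : List Char) : List (List Char) :=
  match cs with
  | [] => if num ≠ [] then [num] else []
  | c :: cs =>
    if PySem.Chars.isdigit c then splitA cs (num ++ [c])
    else (if num ≠ [] then [num] else []) ++ [c] :: splitA cs []

theorem bridgeA (cs : List Char) (eq : List (List Char)) (num : List Char) :
    (cs.foldl reverseEqnStepA (eq, num)).1 ++
      (if (cs.foldl reverseEqnStepA (eq, num)).2 = [] then [] else [(cs.foldl reverseEqnStepA (eq, num)).2]) =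
      eq ++ splitA cs num := by
  induction cs generalizing eq num with
  | nil => simp [splitA]
  | cons c cs ih =>
    simp only [List.foldl_cons, splitA, reverseEqnStepA]
    by_cases h : PySem.Chars.isdigit c <;> simp [h, ih]

-- first token of splitA: the pending buffer extended by the leading digit run
theorem splitA_take (cs : List Char) (num : List Char) :
    splitA cs num =
      (if num ++ cs.takeWhile PySem.Chars.isdigit ≠ [] then [num ++ cs.takeWhile PySem.Chars.isdigit] else []) ++
      (match cs.dropWhile PySem.Chars.isdigit with
       | [] => []
       | c :: r => [c] :: splitA r []) := by
  induction cs generalizing num with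
  | nil => simp [splitA]
  | cons c cs ih =>
    by_cases h : PySem.Chars.isdigit c
    · simp only [splitA, h, if_pos, List.takeWhile_cons_of_pos h, List.dropWhile_cons_of_pos h]
      rw [ih (num ++ [c])]
      simp
    · simp [splitA, h, List.takeWhile_cons_of_neg, List.dropWhile_cons_of_neg]

-- the first element surviving dropWhile fails the predicate
theorem head_dropWhile_false {α : Type} (p : α → Bool) (l : List α) (d : α) (r : List α)
    (h : l.dropWhile p = d :: r) : p d = false := by
  induction l with
  | nil => simp at h
  | cons a l ih =>
    rw [List.dropWhile_cons] at h
    split at h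
    · exact ih h
    · cases h; exact eq_false_of_ne_true ‹_›

-- B's loop computes the reversed-token flatten of A's tokenization, prepended to out
theorem goB_spec (cs : List Char) (out : List Char) :
    reverseEqnGoB cs out = (splitA cs []).reverse.flatten ++ out := by
  induction cs, out using reverseEqnGoB.induct with
  | case1 out => simp [reverseEqnGoB, splitA]
  | case2 out c rest h ih =>
    rw [reverseEqnGoB]
    simp only [h, if_pos]
    rw [ih]
    rw [splitA_take (c :: rest) []]
    have ht : (c :: rest).takeWhile PySem.Chars.isdigit = c :: rest.takeWhile PySem.Chars.isdigit :=
      List.takeWhile_cons_of_pos h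
    rw [ht]
    rcases hd : (c :: rest).dropWhile PySem.Chars.isdigit with _ | ⟨d, r⟩
    · rw [hd] at ih; simp [splitA] at ih ⊢
    · rw [hd] at ih
      have hd' : PySem.Chars.isdigit d = false := head_dropWhile_false _ _ _ _ hd
      simp [splitA, hd']
  | case3 out c rest h ih =>
    rw [reverseEqnGoB]
    simp only [h]
    rw [ih]
    simp [splitA, h]

-- ===== VERDICT (by name: the statement is the Claim_ definition above) =====
theorem reverseEqn_spec : Claim_equal_reverseEqn := by
  intro s _
  show reverseEqn s = reverseEqn_alt s
  unfold reverseEqn reverseEqn_alt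
  dsimp only
  simp only [ne_eq, ite_not]
  rw [bridgeA s.toList [] [], goB_spec]
  simp
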